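-- pv_equiv track=rewrite | github.com/keiba-debug/keiba-cicd-core | keiba-v1/KeibaCICD.keibabook/src/accumulator_cli.py | _calculate_course_distance_perf
-- ===== SOURCE A (Python) =====
-- from typing import Dict, List, Any, Optional
--
-- def _calculate_course_distance_perf(history: List[Dict]) -> Dict:
--     """同コース×距離の成績を集計"""
--     perf = {'runs': 0, 'win': 0, 'in3': 0}
--
--     # 簡易版：全レースを集計（本来は同コース×距離でフィルタリング）
--     for race in history:
--         position = race.get('finish_position')
--         if position:
--             try:
--                 pos = int(position)
--                 perf['runs'] += 1
--                 if pos == 1: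
--                     perf['win'] += 1
--                 if pos <= 3:
--                     perf['in3'] += 1
--             except:
--                 pass
--
--     return perf
-- ===== SOURCE B (Python) =====
-- def _parse_position(race):
--     """Return the parsed finish position, or None if missing/falsy/unparseable."""
--     position = race.get('finish_position')
--     if not position:
--         return None
--     try:
--         return int(position)
--     except:
--         return None
--
-- def _calculate_course_distance_perf(history):
--     positions = [p for p in map(_parse_position, history) if p is not None]
--     return {'runs': len(positions),
--             'win': positions.count(1),
--             'in3': sum(1 for p in positions if p <= 3)}
-- ===== Notes on version B (the rewrite author's own statement) =====
-- stated objective: simpler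
-- what changed: Replaces the fused dict-accumulation loop by a parse/filter helper that yields a list of valid positions, from which runs/win/in3 are read off as len, count(1) and a sum over p<=3.
import Mathlib
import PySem

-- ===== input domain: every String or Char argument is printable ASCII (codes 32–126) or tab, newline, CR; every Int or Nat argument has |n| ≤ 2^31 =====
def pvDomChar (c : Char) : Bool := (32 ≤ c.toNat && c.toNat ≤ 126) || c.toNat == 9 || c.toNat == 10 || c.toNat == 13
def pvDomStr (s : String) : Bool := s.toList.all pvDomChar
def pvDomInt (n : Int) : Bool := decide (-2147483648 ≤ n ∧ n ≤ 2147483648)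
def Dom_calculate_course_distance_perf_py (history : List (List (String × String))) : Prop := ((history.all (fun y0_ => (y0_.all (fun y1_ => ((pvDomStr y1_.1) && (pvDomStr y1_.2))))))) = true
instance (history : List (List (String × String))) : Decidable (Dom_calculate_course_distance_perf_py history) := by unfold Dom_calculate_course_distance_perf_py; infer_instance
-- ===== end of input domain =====

-- B replaces A's fused dict-accumulation loop by a parse/filter helper plus separate counts over the derived list of valid positions (simpler decomposition, same O(n) cost).


-- ===== PORT A =====
-- one iteration of A's loop body (race.get, truthiness test, int(), three dict updates)
def pvStepA (perf : PySem.Dict String Int) (race : List (String × String)) : PySem.Dict String Int :=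
  match (PySem.Dict.ofList race).get? "finish_position" with
  | none => perf
  | some position =>
    if position = "" then perf
    else
      match PySem.Int.ofStr? position with
      | none => perf  -- bare except: int() failed
      | some pos =>
        let p1 := perf.insert "runs" (perf.getD "runs" 0 + 1)
        let p2 := if pos = 1 then p1.insert "win" (p1.getD "win" 0 + 1) else p1
        if pos ≤ 3 then p2.insert "in3" (p2.getD "in3" 0 + 1) else p2

def calculate_course_distance_perf_py (history : List (List (String × String))) : List (String × Int) :=
  (history.foldl pvStepA (PySem.Dict.ofList [("runs", 0), ("win", 0), ("in3", 0)])).items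

-- ===== PORT B =====
-- parse one race: None when 'finish_position' is missing or falsy or int() raises
def pvParsePos (race : List (String × String)) : Option Int :=
  match (PySem.Dict.ofList race).get? "finish_position" with
  | some s => if s = "" then none else PySem.Int.ofStr? s
  | none => none

def calculate_course_distance_perf_py_alt (history : List (List (String × String))) : List (String × Int) :=
  let positions := history.filterMap pvParsePos
  [("runs", (positions.length : Int)),
   ("win", (positions.count 1 : Int)),
   ("in3", ((positions.countP (fun p => decide (p ≤ 3))) : Int))]

-- ===== PRECONDITION & SPEC =====
def Spec_calculate_course_distance_perf_py (history : List (List (String × String))) (out : List (String × Int)) : Prop := out = calculate_course_distance_perf_py_alt history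
instance (history : List (List (String × String))) (out : List (String × Int)) : Decidable (Spec_calculate_course_distance_perf_py history out) := by unfold Spec_calculate_course_distance_perf_py; infer_instance

-- ===== CLAIM (what is proved, stated in full; the proofs are below) =====
def Claim_equal_calculate_course_distance_perf_py : Prop := ∀ (history : List (List (String × String))), Dom_calculate_course_distance_perf_py history → Spec_calculate_course_distance_perf_py history (calculate_course_distance_perf_py history)

-- ===== LEMMAS AND PROOFS =====

-- A's step leaves the state unchanged when B's parser yields nothing
lemma pvStepA_none (perf : PySem.Dict String Int) (race : List (String × String))
    (h : pvParsePos race = none) : pvStepA perf race = perf := by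
  unfold pvStepA
  unfold pvParsePos at h
  cases hg : (PySem.Dict.ofList race).get? "finish_position" with
  | none => rfl
  | some s =>
    rw [hg] at h
    by_cases hs : s = ""
    · simp [hs]
    · simp [hs] at h ⊢
      rw [h]

-- A's step on the literal 3-key state, when B's parser yields pos n
lemma pvStepA_some (r w i : Int) (race : List (String × String)) (n : Int)
    (h : pvParsePos race = some n) :
    pvStepA (PySem.Dict.mk [("runs", r), ("win", w), ("in3", i)]) race
      = PySem.Dict.mk [("runs", r + 1),
                       ("win", w + (if n = 1 then 1 else 0)),
                       ("in3", i + (if n ≤ 3 then 1 else 0))] := by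
  unfold pvStepA
  unfold pvParsePos at h
  cases hg : (PySem.Dict.ofList race).get? "finish_position" with
  | none => rw [hg] at h; cases h
  | some s =>
    rw [hg] at h
    by_cases hs : s = ""
    · simp [hs] at h
    · simp [hs] at h ⊢
      rw [h]
      by_cases h1 : n = 1 <;> by_cases h3 : n ≤ 3 <;>
        simp [h1, h3, PySem.Dict.insert, PySem.Dict.getD, PySem.Dict.get?, PySem.Dict.contains]

-- loop invariant: folding A's step over history adds B's counts to the state
lemma pvLoop_items (history : List (List (String × String))) : ∀ (r w i : Int),
    (history.foldl pvStepA (PySem.Dict.mk [("runs", r), ("win", w), ("in3", i)])).items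
      = [("runs", r + ((history.filterMap pvParsePos).length : Int)),
         ("win", w + ((history.filterMap pvParsePos).count 1 : Int)),
         ("in3", i + (((history.filterMap pvParsePos).countP (fun p => decide (p ≤ 3))) : Int))] := by
  induction history with
  | nil => intro r w i; simp
  | cons race rest ih =>
    intro r w i
    rw [List.foldl_cons]
    cases hp : pvParsePos race with
    | none =>
      rw [pvStepA_none _ _ hp, ih]
      simp [hp]
    | some n =>
      rw [pvStepA_some r w i race n hp, ih]
      simp only [List.filterMap_cons, hp, List.length_cons, List.count_cons, List.countP_cons]
      simp only [List.cons_eq_cons, Prod.mk.injEq, and_true, true_and]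
      refine ⟨?_, ?_, ?_⟩ <;>
        · by_cases h1 : n = 1 <;> by_cases h3 : n ≤ 3 <;>
            simp [h1, h3] <;> omega

lemma pvInit_eq : (PySem.Dict.ofList [("runs", (0:Int)), ("win", 0), ("in3", 0)])
    = PySem.Dict.mk [("runs", 0), ("win", 0), ("in3", 0)] := by
  simp [PySem.Dict.ofList, PySem.Dict.update, PySem.Dict.insert, PySem.Dict.empty, PySem.Dict.contains]

-- ===== VERDICT (by name: the statement is the Claim_ definition above) =====
theorem calculate_course_distance_perf_py_spec : Claim_equal_calculate_course_distance_perf_py := by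
  intro history _
  unfold Spec_calculate_course_distance_perf_py calculate_course_distance_perf_py calculate_course_distance_perf_py_alt
  rw [pvInit_eq, pvLoop_items]
  simp
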